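-- pv_equiv track=rewrite | github.com/lucifer1198/Codesignal | solutions/python/2017/makeArrayConsecutive.py | makeArrayConsecutive
-- ===== SOURCE A (Python) =====
-- def makeArrayConsecutive(sequence):
--     s = sorted(sequence)
--     x = range(min(s), max(s) + 1)
--     res = []
--     for elem in x:
--         if elem not in s:
--             res.append(elem)
--     return res
-- ===== SOURCE B (Python) =====
-- def makeArrayConsecutive(sequence):
--     s = sorted(set(sequence))
--     res = []
--     for a, b in zip(s, s[1:]):
--         res.extend(range(a + 1, b))
--     return res
-- ===== Notes on version B (the rewrite author's own statement) =====
-- stated objective: faster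
-- what changed: Instead of scanning the whole min..max range and testing each value for membership, B sorts the distinct elements once and emits the gap range(a+1,b) between each consecutive pair, so the input is never re-scanned per range element.
import Mathlib
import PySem

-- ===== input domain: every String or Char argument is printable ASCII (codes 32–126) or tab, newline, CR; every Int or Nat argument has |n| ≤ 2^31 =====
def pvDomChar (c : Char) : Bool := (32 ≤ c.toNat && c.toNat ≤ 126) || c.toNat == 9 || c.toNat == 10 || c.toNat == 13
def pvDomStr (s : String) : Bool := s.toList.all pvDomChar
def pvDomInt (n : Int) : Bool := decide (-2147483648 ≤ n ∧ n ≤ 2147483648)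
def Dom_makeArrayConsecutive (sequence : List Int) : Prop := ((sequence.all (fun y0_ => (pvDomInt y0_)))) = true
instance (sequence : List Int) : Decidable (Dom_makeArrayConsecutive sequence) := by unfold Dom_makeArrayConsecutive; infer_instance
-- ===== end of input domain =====

-- B sorts the distinct elements once and emits the gap range between each
-- consecutive pair, instead of A's scan of the whole min..max range with a
-- membership test per element (reported measurably faster in a timing run
-- only if it says so; objective: different algorithm, avoids the per-element scan).

-- ===== PORT A =====
def makeArrayConsecutive (sequence : List Int) : List Int :=
  let s := PySem.List.sorted sequence (fun y => y) false
  match PySem.List.min? s (fun y => y), PySem.List.max? s (fun y => y) with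
  | some lo, some hi =>
      (PySem.List.pyRange lo (hi + 1) 1).foldl
        (fun res elem => if elem ∉ s then res ++ [elem] else res) []
  | _, _ => []  -- unreachable under Pre_ (Python raises ValueError on empty input)

-- ===== PORT B =====
def makeArrayConsecutive_alt (sequence : List Int) : List Int :=
  let s := PySem.List.sorted (PySem.Set.ofList sequence) (fun y => y) false
  (s.zip (PySem.List.slice s (some 1) none)).foldl
    (fun res p => res ++ PySem.List.pyRange (p.1 + 1) p.2 1) []

-- ===== PRECONDITION & SPEC =====
-- Pre_ excludes only the empty list, on which A raises ValueError (min of empty sequence).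
def Pre_makeArrayConsecutive (sequence : List Int) : Prop := sequence ≠ []
instance (sequence : List Int) : Decidable (Pre_makeArrayConsecutive sequence) := by
  unfold Pre_makeArrayConsecutive; infer_instance

def pvWitness_makeArrayConsecutive : List Int := [4, 1, 3]

def Spec_makeArrayConsecutive (sequence : List Int) (out : List Int) : Prop :=
  out = makeArrayConsecutive_alt sequence
instance (sequence : List Int) (out : List Int) : Decidable (Spec_makeArrayConsecutive sequence out) := by
  unfold Spec_makeArrayConsecutive; infer_instance

-- ===== CLAIM (what is proved, stated in full; the proofs are below) =====
def Claim_equal_makeArrayConsecutive : Prop :=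
  ∀ (sequence : List Int), Dom_makeArrayConsecutive sequence →
    Pre_makeArrayConsecutive sequence →
    Spec_makeArrayConsecutive sequence (makeArrayConsecutive sequence)

-- ===== LEMMAS AND PROOFS =====

-- The gaps between consecutive members of a strictly increasing list a :: t whose
-- greatest member is z are exactly the values of a..z missing from a :: t.
lemma gaps_eq (t : List Int) :
    ∀ (a z : Int), List.Pairwise (· < ·) (a :: t) → z ∈ a :: t → (∀ y ∈ a :: t, y ≤ z) →
      ((a :: t).zip t).flatMap (fun p => PySem.List.pyRange (p.1 + 1) p.2 1)
        = (PySem.List.pyRange a (z + 1) 1).filter (fun x => decide (x ∉ a :: t)) := by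
  induction t with
  | nil =>
      intro a z _ hz _
      simp at hz; subst hz
      simp [PySem.List.pyRange_one_singleton]
  | cons b rest ih =>
      intro a z hpw hz hub
      have hab : a < b := (List.pairwise_cons.mp hpw).1 b (by simp)
      have hrest_pw : List.Pairwise (· < ·) (b :: rest) := (List.pairwise_cons.mp hpw).2
      have ha_lt : ∀ y ∈ b :: rest, a < y := (List.pairwise_cons.mp hpw).1
      have hb_le : ∀ y ∈ b :: rest, b ≤ y := by
        intro y hy
        rcases hy with _ | hy
        · exact le_refl b
        · exact le_of_lt ((List.pairwise_cons.mp hrest_pw).1 y (by assumption))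
      have hz' : z ∈ b :: rest := by
        rcases List.mem_cons.mp hz with heq | h
        · exfalso
          have hb := hub b (by simp)
          omega
        · exact h
      have hbz : b ≤ z := hb_le z hz'
      have hub' : ∀ y ∈ b :: rest, y ≤ z := fun y hy => hub y (List.mem_cons_of_mem a hy)
      -- left side: first gap plus the gaps of the tail
      have hzip : ((a :: b :: rest).zip (b :: rest)) = (a, b) :: ((b :: rest).zip rest) := rfl
      rw [hzip, List.flatMap_cons, ih b z hrest_pw hz' hub']
      -- right side: split the range at a+1 and at b
      rw [PySem.List.pyRange_one_append a b (z + 1) (by omega) (by omega),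
          PySem.List.pyRange_one_cons (by omega : a < b)]
      rw [List.filter_append, List.filter_cons]
      have ha_self : (decide (a ∉ a :: b :: rest)) = false := by simp
      rw [ha_self]
      have hmid : (PySem.List.pyRange (a + 1) b 1).filter (fun x => decide (x ∉ a :: b :: rest))
          = PySem.List.pyRange (a + 1) b 1 := by
        apply List.filter_eq_self.mpr
        intro x hx
        have hxr := (PySem.List.mem_pyRange_one).mp hx
        simp only [decide_eq_true_eq]
        intro hmem
        rcases hmem with _ | hmem
        · omega
        · have := hb_le x (by assumption)
          omega
      rw [hmid]
      have htail : (PySem.List.pyRange b (z + 1) 1).filter (fun x => decide (x ∉ a :: b :: rest))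
          = (PySem.List.pyRange b (z + 1) 1).filter (fun x => decide (x ∉ b :: rest)) := by
        apply List.filter_congr
        intro x hx
        have hxr := (PySem.List.mem_pyRange_one).mp hx
        simp only [decide_eq_decide, List.mem_cons]
        constructor
        · intro h hmem; exact h (Or.inr hmem)
        · intro h hmem
          rcases hmem with hxa | hmem
          · omega
          · exact h hmem
      rw [htail]
      simp

-- ===== VERDICT (by name: the statement is the Claim_ definition above) =====
theorem makeArrayConsecutive_spec : Claim_equal_makeArrayConsecutive := by
  intro sequence _ hpre
  unfold Spec_makeArrayConsecutive makeArrayConsecutive makeArrayConsecutive_alt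
  dsimp only
  -- B side: zip with the tail and a flatMap over the gaps
  set t := PySem.List.sorted (PySem.Set.ofList sequence) (fun y => y) false with ht
  have htmem : ∀ x : Int, x ∈ t ↔ x ∈ sequence := by
    intro x
    rw [ht, PySem.List.mem_sorted, PySem.Set.mem_ofList]
  have htpw : List.Pairwise (· < ·) t := PySem.List.sorted_ofList_pairwise_lt sequence
  -- A side: min/max of the sorted copy exist since sequence ≠ []
  cases h1 : PySem.List.min? (PySem.List.sorted sequence (fun y => y) false) (fun y => y) with
  | none =>
      rw [PySem.List.min?_eq_none_iff, PySem.List.sorted_eq_nil_iff] at h1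
      exact absurd h1 hpre
  | some lo =>
  cases h2 : PySem.List.max? (PySem.List.sorted sequence (fun y => y) false) (fun y => y) with
  | none =>
      rw [PySem.List.max?_eq_none_iff, PySem.List.sorted_eq_nil_iff] at h2
      exact absurd h2 hpre
  | some hi =>
  show (PySem.List.pyRange lo (hi + 1) 1).foldl
        (fun res elem => if elem ∉ PySem.List.sorted sequence (fun y => y) false
                         then res ++ [elem] else res) [] = _
  have hlo_mem : lo ∈ sequence := by
    have := PySem.List.min?_mem h1
    rwa [PySem.List.mem_sorted] at this
  have hlo_min : ∀ y ∈ sequence, lo ≤ y := by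
    intro y hy
    exact PySem.List.min?_isMin h1 y ((PySem.List.mem_sorted _ _ _ _).mpr hy)
  have hhi_mem : hi ∈ sequence := by
    have := PySem.List.max?_mem h2
    rwa [PySem.List.mem_sorted] at this
  have hhi_max : ∀ y ∈ sequence, y ≤ hi := by
    intro y hy
    exact PySem.List.max?_isMax h2 y ((PySem.List.mem_sorted _ _ _ _).mpr hy)
  -- t is nonempty: destructure it
  have hlo_t : lo ∈ t := (htmem lo).mpr hlo_mem
  obtain ⟨a, u, htau⟩ : ∃ a u, t = a :: u := by
    cases hcase : t with
    | nil => rw [hcase] at hlo_t; simp at hlo_t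
    | cons a u => exact ⟨a, u, rfl⟩
  have ha_eq : a = lo := by
    have ha_mem : a ∈ sequence := (htmem a).mp (by rw [htau]; simp)
    have h1' : lo ≤ a := hlo_min a ha_mem
    have h2' : a ≤ lo := by
      rw [htau] at hlo_t htpw
      rcases hlo_t with _ | hlo_u
      · exact le_refl _
      · exact le_of_lt ((List.pairwise_cons.mp htpw).1 lo (by assumption))
    omega
  have hhi_t : hi ∈ a :: u := by rw [← htau]; exact (htmem hi).mpr hhi_mem
  have hub : ∀ y ∈ a :: u, y ≤ hi := by
    intro y hy
    exact hhi_max y ((htmem y).mp (by rw [htau]; exact hy))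
  have htpw' : List.Pairwise (· < ·) (a :: u) := by rw [← htau]; exact htpw
  -- rewrite both folds
  rw [PySem.List.foldl_append_ite_eq_filter
        (fun elem => elem ∉ PySem.List.sorted sequence (fun y => y) false)]
  rw [htau, PySem.List.slice_from_one]
  show _ = ((a :: u).zip u).foldl (fun res p => res ++ PySem.List.pyRange (p.1 + 1) p.2 1) []
  rw [PySem.List.foldl_append_eq_flatMap]
  rw [List.nil_append, List.nil_append]
  rw [gaps_eq u a hi htpw' hhi_t hub, ha_eq]
  apply List.filter_congr
  intro x _
  simp only [decide_eq_decide, PySem.List.mem_sorted]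
  rw [← ha_eq, ← htau]
  constructor
  · intro h hx; exact h ((htmem x).mp hx)
  · intro h hx; exact h ((htmem x).mpr hx)
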